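-- pv_equiv track=rewrite | github.com/yhsol/algorithm_study | book/python_algorithm_interview/chapter19.py | single_number_two
-- ===== SOURCE A (Python) =====
-- from typing import List
--
-- def single_number_two(nums: List[int]) -> int:
--     result = 0
--     for i, v in enumerate(nums):
--         if i < len(nums) / 2:
--             result += v
--         else:
--             result -= v
--     return abs(result)
-- ===== SOURCE B (Python) =====
-- from typing import List
--
-- def single_number_two(nums: List[int]) -> int:
--     # Two-pointer: pair elements from both ends; every front element lands in
--     # the first half and every back element in the second half, a leftover
--     # middle element joins the first half (same rule as ceil(n/2) split).
--     i, j, d = 0, len(nums) - 1, 0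
--     while i < j:
--         d += nums[i] - nums[j]
--         i += 1
--         j -= 1
--     if i == j:
--         d += nums[i]
--     return abs(d)
-- ===== Notes on version B (the rewrite author's own statement) =====
-- stated objective: alternative
-- what changed: Replaces A's single enumerate pass with a per-index 'i < n/2' test by a two-pointer loop that walks inward from both ends, accumulating the pairwise difference nums[i]-nums[j] and adding a leftover middle element; no index-vs-midpoint comparison ever happens.
import Mathlib
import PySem

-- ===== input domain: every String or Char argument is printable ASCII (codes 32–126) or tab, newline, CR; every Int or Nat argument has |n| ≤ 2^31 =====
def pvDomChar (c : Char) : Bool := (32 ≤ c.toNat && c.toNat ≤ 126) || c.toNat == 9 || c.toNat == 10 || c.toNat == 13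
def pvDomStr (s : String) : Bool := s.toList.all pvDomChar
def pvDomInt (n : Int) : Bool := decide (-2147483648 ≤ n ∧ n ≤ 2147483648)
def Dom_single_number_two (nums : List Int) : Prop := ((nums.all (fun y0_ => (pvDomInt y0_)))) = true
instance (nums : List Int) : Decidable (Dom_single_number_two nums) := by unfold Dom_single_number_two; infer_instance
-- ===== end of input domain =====

-- B walks a two-pointer loop inward from both ends (pairing nums[i] with nums[j]) instead of A's
-- single enumerate pass with an index-vs-midpoint test (objective: alternative, same O(n) cost).

-- ===== PORT A =====
-- 'i < len(nums)/2' uses true division; for ints i, n in range it is exactly 2*i < n.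
def single_number_two (nums : List Int) : Int :=
  |(PySem.List.enumerate nums).foldl
    (fun result p => if 2 * p.1 < (nums.length : Int) then result + p.2 else result - p.2) 0|

-- ===== PORT B =====
-- the while loop of Source B; indices stay in [0, len) whenever read, so the .getD 0 default is never used
def pvPeel (nums : List Int) (i j d : Int) : Int :=
  if i < j then
    pvPeel nums (i + 1) (j - 1)
      (d + (PySem.List.pyGet? nums i).getD 0 - (PySem.List.pyGet? nums j).getD 0)
  else if i = j then d + (PySem.List.pyGet? nums i).getD 0
  else d
termination_by (j - i).toNat
decreasing_by omega

def single_number_two_alt (nums : List Int) : Int :=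
  |pvPeel nums 0 ((nums.length : Int) - 1) 0|

-- ===== PRECONDITION & SPEC =====
def Spec_single_number_two (nums : List Int) (out : Int) : Prop := out = single_number_two_alt nums
instance (nums : List Int) (out : Int) : Decidable (Spec_single_number_two nums out) := by unfold Spec_single_number_two; infer_instance

-- ===== CLAIM (what is proved, stated in full; the proofs are below) =====
def Claim_equal_single_number_two : Prop := ∀ (nums : List Int), Dom_single_number_two nums → Spec_single_number_two nums (single_number_two nums)

-- ===== LEMMAS AND PROOFS =====

-- sum of the index window [a, b) of nums
def pvSumR (nums : List Int) (a b : Nat) : Int := ((nums.drop a).take (b - a)).sum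

theorem pvSumR_empty (nums : List Int) (a b : Nat) (h : b ≤ a) : pvSumR nums a b = 0 := by
  unfold pvSumR
  rw [show b - a = 0 by omega]
  simp

theorem pvSumR_cons (nums : List Int) (a b : Nat) (h1 : a < b) (h2 : a < nums.length) :
    pvSumR nums a b = nums.getD a 0 + pvSumR nums (a + 1) b := by
  unfold pvSumR
  rw [show b - a = (b - (a + 1)) + 1 by omega, List.drop_eq_getElem_cons h2,
      List.take_succ_cons, List.sum_cons, List.getD_eq_getElem nums 0 h2]

theorem pvSumR_snoc (nums : List Int) (a b : Nat) (h1 : a < b) (h2 : b ≤ nums.length) :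
    pvSumR nums a b = pvSumR nums a (b - 1) + nums.getD (b - 1) 0 := by
  unfold pvSumR
  rw [show b - a = ((b - 1) - a) + 1 by omega, List.take_add_one]
  have hb : (b - 1) < nums.length := by omega
  have : (nums.drop a)[(b - 1) - a]? = some nums[b - 1] := by
    rw [List.getElem?_drop, show a + ((b - 1) - a) = b - 1 by omega]
    exact List.getElem?_eq_getElem hb
  rw [this]
  simp [List.getD, List.getElem?_eq_getElem hb]

theorem pvPeel_inv (nums : List Int) :
    ∀ (k i j : Nat), j + 1 - i = k → i ≤ j + 1 → j < nums.length → ∀ d : Int,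
      pvPeel nums (i : Int) (j : Int) d
        = d + pvSumR nums i ((i + j + 2) / 2) - pvSumR nums ((i + j + 2) / 2) (j + 1) := by
  intro k
  induction k using Nat.strong_induction_on with
  | _ k ih =>
    intro i j hk hij hj d
    rcases lt_trichotomy i j with hlt | heq | hgt
    · -- recursive step
      rw [pvPeel, if_pos (by exact_mod_cast hlt)]
      have hi : i < nums.length := by omega
      rw [PySem.List.pyGet?_natCast, PySem.List.pyGet?_natCast,
          List.getElem?_eq_getElem hi, List.getElem?_eq_getElem hj]
      have hcast1 : (i : Int) + 1 = ((i + 1 : Nat) : Int) := by push_cast; ring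
      have hcast2 : (j : Int) - 1 = ((j - 1 : Nat) : Int) := by
        have : 1 ≤ j := by omega
        push_cast [this]; ring
      rw [hcast1, hcast2,
        ih (j - i - 1) (by omega) (i + 1) (j - 1) (by omega) (by omega) (by omega)]
      have hc : ((i + 1) + (j - 1) + 2) / 2 = (i + j + 2) / 2 := by omega
      rw [hc]
      set c := (i + j + 2) / 2 with hcdef
      have hic : i < c := by omega
      have hcj : c ≤ j := by omega
      rw [pvSumR_cons nums i c hic hi, pvSumR_snoc nums c (j + 1) (by omega) (by omega)]
      have hgi : nums.getD i 0 = nums[i] := List.getD_eq_getElem nums 0 hi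
      have hgj : nums.getD (j + 1 - 1) 0 = nums[j] := by
        rw [show j + 1 - 1 = j from rfl]; exact List.getD_eq_getElem nums 0 hj
      rw [hgi, hgj]
      simp only [Option.getD_some, Nat.succ_sub_one]
      rw [show (j - 1) + 1 = j by omega]
      ring
    · -- middle element
      subst heq
      rw [pvPeel, if_neg (by omega), if_pos rfl]
      rw [PySem.List.pyGet?_natCast, List.getElem?_eq_getElem hj]
      have hc : (i + i + 2) / 2 = i + 1 := by omega
      rw [hc, pvSumR_cons nums i (i + 1) (by omega) hj,
          pvSumR_empty nums (i + 1) (i + 1) (le_refl _)]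
      rw [List.getD_eq_getElem nums 0 hj]
      simp
    · -- empty window: i = j + 1
      have hij' : i = j + 1 := by omega
      rw [pvPeel, if_neg (by omega), if_neg (by exact_mod_cast (by omega : ¬ (i : Int) = (j : Int)))]
      subst hij'
      have hc : (j + 1 + j + 2) / 2 = j + 1 := by omega
      rw [hc, pvSumR_empty nums (j + 1) (j + 1) (le_refl _)]
      ring

theorem pv_foldl_all_true (n : Int) (l : List Int) (s : Int) (acc : Int)
    (h : ∀ k : Nat, k < l.length → 2 * (s + (k : Int)) < n) :
    (PySem.List.enumerate l s).foldl
      (fun result p => if 2 * p.1 < n then result + p.2 else result - p.2) acc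
      = acc + l.sum := by
  induction l generalizing s acc with
  | nil => simp [PySem.List.enumerate_nil]
  | cons x xs ih =>
    have h0 : 2 * (s + (0 : Int)) < n := by exact_mod_cast h 0 (by simp)
    simp only [PySem.List.enumerate_cons, List.foldl_cons]
    rw [if_pos (by simpa using h0)]
    rw [ih (s + 1) (acc + x) (fun k hk => by
      have := h (k + 1) (by simpa using Nat.succ_lt_succ hk)
      push_cast at this ⊢; linarith)]
    simp [List.sum_cons]; ring

theorem pv_foldl_all_false (n : Int) (l : List Int) (s : Int) (acc : Int)
    (h : ∀ k : Nat, k < l.length → ¬ 2 * (s + (k : Int)) < n) :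
    (PySem.List.enumerate l s).foldl
      (fun result p => if 2 * p.1 < n then result + p.2 else result - p.2) acc
      = acc - l.sum := by
  induction l generalizing s acc with
  | nil => simp [PySem.List.enumerate_nil]
  | cons x xs ih =>
    have h0 : ¬ 2 * (s + (0 : Int)) < n := h 0 (by simp)
    simp only [PySem.List.enumerate_cons, List.foldl_cons]
    rw [if_neg (by simpa using h0)]
    rw [ih (s + 1) (acc - x) (fun k hk => by
      have := h (k + 1) (by simpa using Nat.succ_lt_succ hk)
      push_cast at this ⊢; linarith)]
    simp [List.sum_cons]; ring

-- ===== VERDICT (by name: the statement is the Claim_ definition above) =====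
theorem single_number_two_spec : Claim_equal_single_number_two := by
  intro nums _
  unfold Spec_single_number_two single_number_two single_number_two_alt
  rcases Nat.eq_zero_or_pos nums.length with hn0 | hpos
  · -- empty list: both sides are |0|
    have : nums = [] := List.eq_nil_of_length_eq_zero hn0
    subst this
    simp [PySem.List.enumerate_nil, pvPeel]
  · set n : Nat := nums.length with hn
    set m : Nat := (n + 1) / 2 with hm
    have hmle : m ≤ n := by omega
    -- B side: pvPeel 0 (n-1) 0 = take m sum - drop m sum
    have hBcast : ((nums.length : Int) - 1) = (((n - 1 : Nat)) : Int) := by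
      rw [← hn]; push_cast [hpos]; ring
    have hB : pvPeel nums 0 ((nums.length : Int) - 1) 0
        = (nums.take m).sum - (nums.drop m).sum := by
      have hinv := pvPeel_inv nums (n - 1 + 1) 0 (n - 1) (by omega) (by omega) (by omega) 0
      simp only [Nat.cast_zero] at hinv
      rw [hBcast, hinv]
      have hc : (0 + (n - 1) + 2) / 2 = m := by omega
      rw [hc, show (n - 1) + 1 = n by omega]
      unfold pvSumR
      have h1 : (nums.drop 0).take (m - 0) = nums.take m := by simp
      have h2 : (nums.drop m).take (n - m) = nums.drop m := by
        apply List.take_of_length_le; simp [← hn]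
      rw [h1, h2]; ring
    -- A side
    have hsplit : nums = nums.take m ++ nums.drop m := (List.take_append_drop m nums).symm
    have hlen : (nums.take m).length = min m n := by simp [hn]
    conv_lhs => rw [hsplit]
    rw [PySem.List.enumerate_append, List.foldl_append]
    rw [pv_foldl_all_true (n := (n : Int)) (s := 0)
        (h := fun k hk => by
          rw [hlen] at hk
          have : k < m := lt_of_lt_of_le hk (min_le_left _ _)
          have : 2 * k < n := by omega
          omega)]
    rw [pv_foldl_all_false (n := (n : Int)) (s := (0 : Int) + (nums.take m).length)
        (h := fun k hk => by
          rw [hlen, min_eq_left hmle]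
          have : n ≤ 2 * m := by omega
          omega)]
    rw [hB]
    simp
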